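-- pv_equiv track=rewrite | github.com/pypi-data/pypi-mirror-61 | packages/moose-classifier/moose_classifier-0.7.tar.gz/moose_classifier-0.7/classifier/classify.py | format_lineages
-- ===== SOURCE A (Python) =====
-- import itertools
-- import operator
--
-- def format_lineages(names, selectors, asterisk='*'):
--     """
--     Create a friendly formatted string of lineages names. Names will
--     have an asterisk value appended *only* if the cooresponding
--     element in the selectors evaluates to True.
--     """
--     names = itertools.zip_longest(names, selectors)
--     names = ((n, asterisk if s else '')
--              for n, s in names)  # add asterisk to selected names
--     names = set(names)
--     names = sorted(names)  # sort by the name plus asterisk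
--     # group by just the names
--     names = itertools.groupby(names, key=operator.itemgetter(0))
--     # prefer asterisk names which will be at the bottom
--     names = (list(g)[-1] for _, g in names)
--     names = (n + a for n, a in names)  # combine names with asterisks
--     # assume species names have exactly two words
--
--     def is_species(s):
--         return len(s.split()) == 2
--
--     names = sorted(names, key=is_species)
--     names = itertools.groupby(names, key=is_species)
--
--     tax = []
--
--     for species, assigns in names:
--         if species:
--             # take the species word and combine them with a '/'
--             assigns = (a.split() for a in assigns)
--             # group by genus name
--             assigns = itertools.groupby(assigns, key=operator.itemgetter(0))
--             assigns = ((k, map(operator.itemgetter(1), g))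
--                        for k, g in assigns)  # get a list of the species names
--             assigns = ('{} {}'.format(k, '/'.join(g))
--                        for k, g in assigns)  # combine species names with '/'
--
--         tax.extend(assigns)
--
--     return ';'.join(sorted(tax))
-- ===== SOURCE B (Python) =====
-- import itertools
--
--
-- def format_lineages(names, selectors, asterisk='*'):
--     """Flag resolution by any() over a padded zip, explicit dedup and
--     partition loops, and a recursive run-merge for genera (no set/max
--     trick, no stable bool sort, no groupby pipelines)."""
--     sels = list(selectors) + [False] * (len(names) - len(selectors))
--     pairs = list(zip(names, sels))
--     uniq = []
--     for n in names:
--         if n not in uniq: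
--             uniq.append(n)
--     flagged = [(n, any(s for m, s in pairs if m == n)) for n in uniq]
--     flagged.sort(key=lambda t: t[0])
--     plain, rows = [], []
--     for n, f in flagged:
--         disp = n + (asterisk if f else '')
--         words = disp.split()
--         if len(words) == 2:
--             rows.append(words)
--         else:
--             plain.append(disp)
--
--     merged = []
--     while rows:
--         genus = rows[0][0]
--         body = rows[1:]
--         run = list(itertools.takewhile(lambda r: r[0] == genus, body))
--         merged.append('{} {}'.format(genus, '/'.join(r[1] for r in [rows[0]] + run)))
--         rows = list(itertools.dropwhile(lambda r: r[0] == genus, body))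
--
--     return ';'.join(sorted(plain + merged))
-- ===== Notes on version B (the rewrite author's own statement) =====
-- stated objective: alternative
-- what changed: Replaces A's set-of-(name,suffix)-pairs / lexicographic-sort / groupby-take-last flag resolution and its stable is_species sort plus nested groupby pipelines with: an any()-scan over a padded zip that OR-resolves each deduped name's flag, one partition loop splitting plain names from species word rows, and a recursive takewhile/dropwhile run-merge that joins each genus's epithets.
-- crash fix: When selectors is longer than names, A raises TypeError (zip_longest pads names with None, which is then concatenated with a str); B zips to the names' length and returns the formatted string. — e.g. on format_lineages(["Canis lupus"], [true, true], "*"): A raises TypeError, B returns "Canis lupus*"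
import Mathlib
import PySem

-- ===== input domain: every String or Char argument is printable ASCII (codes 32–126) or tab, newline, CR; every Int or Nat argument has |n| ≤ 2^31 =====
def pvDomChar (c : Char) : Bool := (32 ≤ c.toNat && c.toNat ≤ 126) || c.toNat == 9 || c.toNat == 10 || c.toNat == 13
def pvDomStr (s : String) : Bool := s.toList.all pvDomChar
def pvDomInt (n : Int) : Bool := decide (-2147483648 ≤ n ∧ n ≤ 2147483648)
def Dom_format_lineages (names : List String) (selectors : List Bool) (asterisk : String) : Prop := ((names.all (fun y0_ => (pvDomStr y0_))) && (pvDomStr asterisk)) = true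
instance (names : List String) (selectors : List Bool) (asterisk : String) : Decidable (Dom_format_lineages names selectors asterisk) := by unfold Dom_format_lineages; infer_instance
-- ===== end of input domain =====

-- B re-implements A without the pair-set/sort/groupby machinery: any()-resolved flags over a
-- padded zip, explicit dedup and partition loops, and a recursive run-merge for genera.
-- Equivalence is claimed for selectors no longer than names (A raises TypeError otherwise).

-- ===== PORT A =====
-- itertools.zip_longest(names, selectors) for the case len(selectors) ≤ len(names):
-- the None padding on the selectors side is falsy, so it is ported as `false`.
-- (When selectors is longer, Python's A raises TypeError; those inputs are outside Pre_.)
def pvZipSel : List (List Char) → List Bool → List (List Char × Bool)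
  | [], _ => []
  | n :: ns, [] => (n, false) :: pvZipSel ns []
  | n :: ns, s :: ss => (n, s) :: pvZipSel ns ss

-- itertools.groupby(xs, key=key): consecutive runs of equal keys
def pvGroupBy {α κ : Type} [BEq κ] (key : α → κ) : List α → List (κ × List α)
  | [] => []
  | x :: xs =>
    match pvGroupBy key xs with
    | [] => [(key x, [x])]
    | (k, g) :: rest =>
      if key x == k then (key x, x :: g) :: rest
      else (key x, [x]) :: (k, g) :: rest

-- is_species(s) = len(s.split()) == 2
def pvIsSpecies (s : List Char) : Bool := (PySem.Chars.split₀ s).length == 2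

-- the body of A, on char lists (strings are ported on the List Char side)
def pvFmtA (ns : List (List Char)) (sels : List Bool) (ast : List Char) : List Char :=
  let pairs := (pvZipSel ns sels).map (fun p => (p.1, if p.2 then ast else ([] : List Char)))
  let pset := PySem.Set.ofList pairs
  let psorted := PySem.List.sorted2 pset (fun p => p.1) (fun p => p.2)
  let lasts := (pvGroupBy (fun p => p.1) psorted).map
    (fun g => PySem.List.pyGetD g.2 (-1) ([], []))          -- list(g)[-1]; groups are nonempty
  let combined := lasts.map (fun p => p.1 ++ p.2)
  let bySp := PySem.List.sorted combined pvIsSpecies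
  let tax := (pvGroupBy pvIsSpecies bySp).foldl (fun tax g =>
      tax ++ (if g.1 then
          (pvGroupBy (fun ws => PySem.List.pyGetD ws 0 []) (g.2.map PySem.Chars.split₀)).map
            (fun kg => kg.1 ++ ' ' :: PySem.Chars.join ['/']
              (kg.2.map (fun ws => PySem.List.pyGetD ws 1 [])))   -- ws[0] / ws[1]: species rows have 2 words
        else g.2)) []
  PySem.Chars.join [';'] (PySem.List.sorted tax (fun s => s))

def format_lineages (names : List String) (selectors : List Bool) (asterisk : String) : String :=
  String.ofList (pvFmtA (names.map (·.toList)) selectors asterisk.toList)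

-- ===== PORT B =====
-- runs(rs): recursive run-merge over the species word rows (takewhile/dropwhile).
-- The recursion is totalized with a fuel argument (rs.length bounds the depth).
def pvRunsGo : Nat → List (List (List Char)) → List (List Char)
  | 0, _ => []
  | _ + 1, [] => []
  | fuel + 1, r :: body =>
    let genus := PySem.List.pyGetD r 0 []
    let run := body.takeWhile (fun q => PySem.List.pyGetD q 0 [] == genus)
    let rest := body.dropWhile (fun q => PySem.List.pyGetD q 0 [] == genus)
    (genus ++ ' ' :: PySem.Chars.join ['/'] ((r :: run).map (fun q => PySem.List.pyGetD q 1 [])))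
      :: pvRunsGo fuel rest

def pvRuns (rows : List (List (List Char))) : List (List Char) := pvRunsGo rows.length rows

-- the body of B, on char lists
def pvFmtB (ns : List (List Char)) (sels : List Bool) (ast : List Char) : List Char :=
  let sels' := sels ++ List.replicate (ns.length - sels.length) false
  let pairs := ns.zip sels'
  let uniq := ns.foldl (fun u n => if u.contains n then u else u ++ [n]) []
  let flagged := uniq.map (fun n => (n, pairs.any (fun p => p.1 == n && p.2)))
  let fsorted := PySem.List.sorted flagged (fun t => t.1)
  let acc := fsorted.foldl
    (fun (acc : List (List Char) × List (List (List Char))) t =>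
      let disp := t.1 ++ (if t.2 then ast else [])
      let words := PySem.Chars.split₀ disp
      if words.length == 2 then (acc.1, acc.2 ++ [words]) else (acc.1 ++ [disp], acc.2))
    ([], [])
  PySem.Chars.join [';'] (PySem.List.sorted (acc.1 ++ pvRuns acc.2) (fun s => s))

def format_lineages_alt (names : List String) (selectors : List Bool) (asterisk : String) : String :=
  String.ofList (pvFmtB (names.map (·.toList)) selectors asterisk.toList)

-- ===== PRECONDITION & SPEC =====
-- Pre_ excludes exactly the inputs with more selectors than names, on which A raises
-- TypeError (zip_longest pads names with None, later concatenated with a str).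
def Pre_format_lineages (names : List String) (selectors : List Bool) (asterisk : String) : Prop :=
  selectors.length ≤ names.length
instance (names : List String) (selectors : List Bool) (asterisk : String) : Decidable (Pre_format_lineages names selectors asterisk) := by unfold Pre_format_lineages; infer_instance

def pvWitness_format_lineages : List String × List Bool × String :=
  (["Canis lupus", "Canis rufus", "Homininae", "Canis lupus"], [false, true], "*")

-- On inputs with more selectors than names A raises TypeError; B zips to the names'
-- length and returns the formatted string.
def Raises_format_lineages (names : List String) (selectors : List Bool) (asterisk : String) : Prop :=
  names.length < selectors.length
instance (names : List String) (selectors : List Bool) (asterisk : String) : Decidable (Raises_format_lineages names selectors asterisk) := by unfold Raises_format_lineages; infer_instance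
def pvRaiseWitness_format_lineages : List String × List Bool × String := (["Canis lupus"], [true, true], "*")
def pvRaiseWitnessOut_format_lineages : String := "Canis lupus*"

def Spec_format_lineages (names : List String) (selectors : List Bool) (asterisk : String) (out : String) : Prop := out = format_lineages_alt names selectors asterisk
instance (names : List String) (selectors : List Bool) (asterisk : String) (out : String) : Decidable (Spec_format_lineages names selectors asterisk out) := by unfold Spec_format_lineages; infer_instance

-- ===== CLAIM (what is proved, stated in full; the proofs are below) =====
def Claim_equal_format_lineages : Prop := ∀ (names : List String) (selectors : List Bool) (asterisk : String), Dom_format_lineages names selectors asterisk → Pre_format_lineages names selectors asterisk → Spec_format_lineages names selectors asterisk (format_lineages names selectors asterisk)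
def Claim_raises_format_lineages : Prop := (∀ (names : List String) (selectors : List Bool) (asterisk : String), Dom_format_lineages names selectors asterisk → Raises_format_lineages names selectors asterisk → ¬ Pre_format_lineages names selectors asterisk) ∧ (Dom_format_lineages (pvRaiseWitness_format_lineages.1) (pvRaiseWitness_format_lineages.2.1) (pvRaiseWitness_format_lineages.2.2) ∧ Raises_format_lineages (pvRaiseWitness_format_lineages.1) (pvRaiseWitness_format_lineages.2.1) (pvRaiseWitness_format_lineages.2.2) ∧ format_lineages_alt (pvRaiseWitness_format_lineages.1) (pvRaiseWitness_format_lineages.2.1) (pvRaiseWitness_format_lineages.2.2) = pvRaiseWitnessOut_format_lineages)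

-- ===== LEMMAS AND PROOFS =====

-- per-name data extracted from the zipped pairs (proof-side helpers)
def pvSfx (ast : List Char) (P : List (List Char × Bool)) (n : List Char) : List Char :=
  if P.any (fun p => p.1 == n && p.2) then ast else []

def pvSufL (ast : List Char) (P : List (List Char × Bool)) (n : List Char) : List (List Char) :=
  (P.filter (fun p => p.1 == n)).map (fun p => if p.2 then ast else [])

def pvBlock (ast : List Char) (P : List (List Char × Bool)) (n : List Char) : List (List Char × List Char) :=
  (PySem.List.sorted (PySem.Set.ofList (pvSufL ast P n)) (fun s => s)).map (fun s => (n, s))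

theorem pv_zip_pad (ns : List (List Char)) (sels : List Bool) (h : sels.length ≤ ns.length) :
    ns.zip (sels ++ List.replicate (ns.length - sels.length) false) = pvZipSel ns sels := by
  induction ns generalizing sels with
  | nil => rfl
  | cons n ns ih =>
    cases sels with
    | nil =>
      simp only [List.nil_append, List.length_nil, Nat.sub_zero, List.length_cons, pvZipSel]
      rw [List.replicate_succ]
      simp only [List.zip_cons_cons]
      have := ih [] (by simp)
      simpa using this
    | cons s ss =>
      simp only [List.length_cons, pvZipSel, List.cons_append, List.zip_cons_cons] at *
      rw [show (ns.length + 1 - (ss.length + 1)) = ns.length - ss.length by omega]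
      rw [ih ss (by omega)]

theorem pv_map_fst_zipSel (ns : List (List Char)) (sels : List Bool) (h : sels.length ≤ ns.length) :
    (pvZipSel ns sels).map (fun p => p.1) = ns := by
  induction ns generalizing sels with
  | nil => cases sels <;> simp [pvZipSel]
  | cons n ns ih =>
    cases sels with
    | nil => simp only [pvZipSel, List.map_cons]; rw [ih [] (by simp)]
    | cons s ss => simp only [pvZipSel, List.map_cons] at *; rw [ih ss (by simpa using h)]

theorem pv_gb_head {α κ : Type} [BEq κ] (key : α → κ) (y : α) (t : List α) :
    ∃ g r, pvGroupBy key (y :: t) = (key y, g) :: r := by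
  show ∃ g r, (match pvGroupBy key t with
    | [] => [(key y, [y])]
    | (k, g) :: rest =>
      if key y == k then (key y, y :: g) :: rest
      else (key y, [y]) :: (k, g) :: rest) = (key y, g) :: r
  match pvGroupBy key t with
  | [] => exact ⟨[y], [], rfl⟩
  | (k, g) :: rest =>
    by_cases hk : key y == k
    · exact ⟨y :: g, rest, by simp [hk]⟩
    · exact ⟨[y], (k, g) :: rest, by simp [hk]⟩

theorem pv_gb_run_append {α κ : Type} [BEq κ] [LawfulBEq κ] (key : α → κ) (k : κ)
    (xs rest : List α) (hne : xs ≠ []) (hk : ∀ x ∈ xs, key x = k)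
    (hrest : ∀ y, rest.head? = some y → key y ≠ k) :
    pvGroupBy key (xs ++ rest) = (k, xs) :: pvGroupBy key rest := by
  induction xs with
  | nil => exact absurd rfl hne
  | cons x xs ih =>
    have hx : key x = k := hk x (by simp)
    cases xs with
    | nil =>
      simp only [List.cons_append, List.nil_append]
      cases rest with
      | nil => simp [pvGroupBy, hx]
      | cons y t =>
        obtain ⟨g, r, hgr⟩ := pv_gb_head key y t
        show (match pvGroupBy key (y :: t) with
          | [] => [(key x, [x])]
          | (k', g) :: rest =>
            if key x == k' then (key x, x :: g) :: rest
            else (key x, [x]) :: (k', g) :: rest) = (k, [x]) :: pvGroupBy key (y :: t)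
        rw [hgr]
        have : (key x == key y) = false := by
          simp only [beq_eq_false_iff_ne, ne_eq, hx]
          exact fun hc => (hrest y rfl) hc.symm
        simp [hx]
        exact fun hc => hrest y rfl hc.symm
    | cons x2 xs2 =>
      have ih' := ih (by simp) (fun a ha => hk a (List.mem_cons_of_mem x ha))
      show (match pvGroupBy key ((x2 :: xs2) ++ rest) with
        | [] => [(key x, [x])]
        | (k', g) :: rest =>
          if key x == k' then (key x, x :: g) :: rest
          else (key x, [x]) :: (k', g) :: rest) = (k, x :: x2 :: xs2) :: pvGroupBy key rest
      rw [ih']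
      have hx2 : key x2 = k := hk x2 (by simp)
      simp [hx]

theorem pv_gb_cons_split {α κ : Type} [BEq κ] [LawfulBEq κ] (key : α → κ) (r : α) (body : List α) :
    pvGroupBy key (r :: body) =
      (key r, r :: body.takeWhile (fun x => key x == key r)) ::
        pvGroupBy key (body.dropWhile (fun x => key x == key r)) := by
  have hsplit : r :: body =
      (r :: body.takeWhile (fun x => key x == key r)) ++ body.dropWhile (fun x => key x == key r) := by
    simp [List.takeWhile_append_dropWhile]
  rw [hsplit]
  apply pv_gb_run_append
  · simp
  · intro x hx
    rcases List.mem_cons.mp hx with h | h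
    · exact h ▸ rfl
    · simpa using (List.mem_takeWhile_imp h)
  · intro y hy
    have := List.head?_dropWhile_not (fun x => key x == key r) body
    rw [hy] at this
    simpa using this

theorem pv_sorted2_eq_sorted_lex {α κ1 κ2 : Type} [LinearOrder κ1] [LinearOrder κ2]
    (i1 : DecidableLT κ1) (i2 : DecidableLT κ2) (j : DecidableLT (Lex (κ1 × κ2)))
    (xs : List α) (k1 : α → κ1) (k2 : α → κ2) :
    @PySem.List.sorted2 α κ1 κ2 _ i1 _ i2 xs k1 k2 false
      = @PySem.List.sorted α (Lex (κ1 × κ2)) _ j xs (fun x => toLex (k1 x, k2 x)) false := by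
  unfold PySem.List.sorted2 PySem.List.sorted
  simp only [Bool.false_eq_true, if_false]
  congr 1
  funext acc x
  congr 1
  funext a b
  rw [Bool.eq_iff_iff]
  simp only [Bool.or_eq_true, Bool.and_eq_true, Bool.not_eq_true', decide_eq_true_eq,
    decide_eq_false_iff_not, Prod.Lex.lt_iff, ofLex_toLex]
  constructor
  · rintro (h | ⟨h1, h2⟩)
    · exact Or.inl h
    · rcases lt_trichotomy (k1 a) (k1 b) with h | h | h
      · exact Or.inl h
      · exact Or.inr ⟨h, h2⟩
      · exact absurd h h1
  · rintro (h | ⟨h1, h2⟩)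
    · exact Or.inl h
    · refine Or.inr ⟨?_, h2⟩
      rw [h1]; exact lt_irrefl _

theorem pv_insert_false {α : Type} (key : α → Bool) (x : α) (F T : List α)
    (hx : key x = false) (hF : ∀ y ∈ F, key y = false) (hT : ∀ y ∈ T, key y = true) :
    PySem.List.insertBy (fun a b => decide (key a < key b)) x (F ++ T) = F ++ x :: T := by
  induction F with
  | nil =>
    cases T with
    | nil => rfl
    | cons y t =>
      show (if decide (key x < key y) = true then _ else _) = _
      rw [hx, hT y (by simp)]
      simp [Bool.lt_iff]
  | cons f F ih =>
    show (if decide (key x < key f) = true then _ else _) = _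
    rw [hx, hF f (by simp)]
    simp only [show decide ((false:Bool) < false) = false from rfl, Bool.false_eq_true, if_false,
      List.cons_append, List.cons.injEq, true_and]
    exact ih (fun y hy => hF y (by simp [hy]))

theorem pv_sorted_bool_go {α : Type} (key : α → Bool) (xs F T : List α)
    (hF : ∀ y ∈ F, key y = false) (hT : ∀ y ∈ T, key y = true) :
    xs.foldl (fun acc x => PySem.List.insertBy (fun a b => decide (key a < key b)) x acc) (F ++ T)
      = (F ++ xs.filter (fun x => !(key x))) ++ (T ++ xs.filter (fun x => key x)) := by
  induction xs generalizing F T with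
  | nil => simp
  | cons x xs ih =>
    simp only [List.foldl_cons]
    cases hx : key x with
    | false =>
      have hF' : ∀ y ∈ F ++ [x], key y = false := by
        intro y hy
        rcases List.mem_append.mp hy with h | h
        · exact hF y h
        · rw [List.mem_singleton.mp h, hx]
      rw [pv_insert_false key x F T hx hF hT,
        show F ++ x :: T = (F ++ [x]) ++ T by simp, ih (F ++ [x]) T hF' hT]
      simp [hx]
    | true =>
      have hnb : ∀ y ∈ F ++ T, decide (key x < key y) = false := by
        intro y hy
        rw [hx]
        rcases List.mem_append.mp hy with h | h
        · rw [hF y h]; rfl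
        · rw [hT y h]; simp
      have hT' : ∀ y ∈ T ++ [x], key y = true := by
        intro y hy
        rcases List.mem_append.mp hy with h | h
        · exact hT y h
        · rw [List.mem_singleton.mp h, hx]
      rw [PySem.List.insertBy_of_forall_not_before _ x (F ++ T) hnb,
        show (F ++ T) ++ [x] = F ++ (T ++ [x]) by simp, ih F (T ++ [x]) hF hT']
      simp [hx]

theorem pv_sorted_bool_filter {α : Type} (xs : List α) (key : α → Bool) :
    PySem.List.sorted xs key = xs.filter (fun x => !(key x)) ++ xs.filter (fun x => key x) := by
  rw [PySem.List.sorted_eq_foldl_insertBy]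
  have := pv_sorted_bool_go key xs [] [] (by simp) (by simp)
  simpa using this

theorem pv_B_sorted {β : Type} (ns : List (List Char)) (f : List Char → β) :
    PySem.List.sorted ((PySem.Set.ofList ns).map (fun n => (n, f n))) (fun t => t.1)
      = (PySem.List.sorted (PySem.Set.ofList ns) (fun s => s)).map (fun n => (n, f n)) := by
  have hI : (fun (a b : List Char) => a.decidableLT b) = (LinearOrder.toDecidableLT : DecidableLT (List Char)) :=
    Subsingleton.elim _ _
  rw [hI]
  apply PySem.List.sorted_eq_of_perm_of_pairwise_lt
  · exact ((@PySem.List.sorted_perm _ _ _ LinearOrder.toDecidableLT (PySem.Set.ofList ns) (fun s => s) false).map _)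
  · have := PySem.List.sorted_ofList_pairwise_lt (κ := List Char) ns
    exact List.Pairwise.map _ (by intro a b hab; simpa using hab) this

theorem pv_runs_go_eq (fuel : Nat) (rows : List (List (List Char))) (hf : rows.length ≤ fuel) :
    pvRunsGo fuel rows =
      (pvGroupBy (fun ws => PySem.List.pyGetD ws 0 []) rows).map
        (fun kg => kg.1 ++ ' ' :: PySem.Chars.join ['/']
          (kg.2.map (fun ws => PySem.List.pyGetD ws 1 []))) := by
  induction fuel generalizing rows with
  | zero =>
    cases rows with
    | nil => rfl
    | cons r body => simp at hf
  | succ fuel ih =>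
    cases rows with
    | nil => rfl
    | cons r body =>
      rw [pvRunsGo]
      rw [pv_gb_cons_split (fun ws => PySem.List.pyGetD ws 0 []) r body]
      simp only [List.map_cons]
      refine List.cons_eq_cons.mpr ⟨rfl, ih _ ?_⟩
      simp only [List.length_cons] at hf
      exact le_trans (List.length_dropWhile_le _ _) (by omega)

theorem pv_runs_eq (rows : List (List (List Char))) :
    pvRuns rows =
      (pvGroupBy (fun ws => PySem.List.pyGetD ws 0 []) rows).map
        (fun kg => kg.1 ++ ' ' :: PySem.Chars.join ['/']
          (kg.2.map (fun ws => PySem.List.pyGetD ws 1 []))) :=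
  pv_runs_go_eq rows.length rows (le_refl _)

theorem pv_sorted_single {α κ : Type} [LT κ] [DecidableLT κ] (x : α) (key : α → κ) :
    PySem.List.sorted [x] key = [x] := rfl

theorem pv_foldl_add_mem {α : Type} [BEq α] [LawfulBEq α] (l : List α) (acc : PySem.Set α)
    (h : ∀ x ∈ l, x ∈ acc) : l.foldl PySem.Set.add acc = acc := by
  induction l generalizing acc with
  | nil => rfl
  | cons x xs ih =>
    simp only [List.foldl_cons]
    have hx : PySem.Set.add acc x = acc := by
      simp [PySem.Set.add, PySem.Set.contains, h x (by simp)]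
    rw [hx]
    exact ih acc (fun y hy => h y (by simp [hy]))

theorem pv_ofList_const {α : Type} [BEq α] [LawfulBEq α] (l : List α) (e : α)
    (hne : l ≠ []) (h : ∀ s ∈ l, s = e) : PySem.Set.ofList l = [e] := by
  cases l with
  | nil => exact absurd rfl hne
  | cons x xs =>
    have hx : x = e := h x (by simp)
    rw [PySem.Set.ofList_eq_foldl]
    simp only [List.foldl_cons]
    have h1 : PySem.Set.add [] x = [e] := by simp [PySem.Set.add, PySem.Set.contains, hx]
    rw [h1]
    exact pv_foldl_add_mem xs [e] (fun y hy => by simp [h y (by simp [hy])])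

theorem pv_last_sufset (ast : List Char) (l : List (List Char)) (hne : l ≠ [])
    (hsub : ∀ s ∈ l, s = [] ∨ s = ast) :
    (PySem.List.sorted (PySem.Set.ofList l) (fun s => s)).getLast? =
      some (if l.any (fun s => s == ast) then ast else []) := by
  by_cases hast : ast = []
  · subst hast
    have hall : ∀ s ∈ l, s = [] := fun s hs => (hsub s hs).elim id id
    rw [pv_ofList_const l [] hne hall, pv_sorted_single]
    simp
  · by_cases hany : l.any (fun s => s == ast)
    · have hastmem : ast ∈ l := by
        obtain ⟨s, hs, hs2⟩ := List.any_eq_true.mp hany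
        exact (eq_of_beq hs2) ▸ hs
      by_cases hnil : l.any (fun s => s == ([] : List Char))
      · have hnilmem : ([] : List Char) ∈ l := by
          obtain ⟨s, hs, hs2⟩ := List.any_eq_true.mp hnil
          exact (eq_of_beq hs2) ▸ hs
        have hI : (fun (a b : List Char) => a.decidableLT b) = (LinearOrder.toDecidableLT : DecidableLT (List Char)) :=
          Subsingleton.elim _ _
        rw [hI]
        have hsorted : @PySem.List.sorted _ _ _ LinearOrder.toDecidableLT (PySem.Set.ofList l) (fun s => s) false
            = [[], ast] := by
          apply PySem.List.sorted_eq_of_perm_of_pairwise_lt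
          · refine ((List.perm_ext_iff_of_nodup ?_ (PySem.Set.nodup_ofList l)).mpr ?_)
            · simp [Ne.symm hast]
            · intro a
              simp only [PySem.Set.mem_ofList, List.mem_cons, List.not_mem_nil, or_false]
              constructor
              · rintro (rfl | rfl)
                exacts [hnilmem, hastmem]
              · intro ha
                rcases hsub a ha with rfl | rfl
                exacts [Or.inl rfl, Or.inr rfl]
          · refine List.pairwise_cons.mpr ⟨?_, by simp⟩
            intro b hb
            rw [List.mem_singleton.mp hb]
            cases ast with
            | nil => exact absurd rfl hast
            | cons c t => exact List.nil_lt_cons c t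
        rw [hsorted]
        simp [hany]
      · have hall : ∀ s ∈ l, s = ast := by
          intro s hs
          rcases hsub s hs with h | h
          · exact absurd (List.any_eq_true.mpr ⟨s, hs, by simp [h]⟩) hnil
          · exact h
        rw [pv_ofList_const l ast hne hall, pv_sorted_single]
        simp [hany]
    · have hall : ∀ s ∈ l, s = [] := by
        intro s hs
        rcases hsub s hs with h | h
        · exact h
        · exact absurd (List.any_eq_true.mpr ⟨s, hs, by simp [h]⟩) hany
      rw [pv_ofList_const l [] hne hall, pv_sorted_single]
      have : l.any (fun s => s == ast) = false := by
        rw [List.any_eq_false]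
        intro s hs
        rw [hall s hs]
        cases hc : (([] : List Char) == ast) with
        | false => exact Bool.false_ne_true
        | true => exact fun _ => hast (eq_of_beq hc).symm
      simp [this]

theorem pv_block_fst (ast : List Char) (P : List (List Char × Bool)) (n : List Char)
    (x : List Char × List Char) (hx : x ∈ pvBlock ast P n) : x.1 = n := by
  obtain ⟨s, _, rfl⟩ := List.mem_map.mp hx
  rfl

theorem pv_mem_block_iff (ast : List Char) (P : List (List Char × Bool)) (n : List Char)
    (x : List Char × List Char) :
    x ∈ pvBlock ast P n ↔ x.1 = n ∧ x.2 ∈ pvSufL ast P n := by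
  unfold pvBlock
  rw [List.mem_map]
  constructor
  · rintro ⟨s, hs, rfl⟩
    exact ⟨rfl, by simpa [PySem.Set.mem_ofList] using ((PySem.List.mem_sorted _ _ _ _).mp hs)⟩
  · rintro ⟨h1, h2⟩
    exact ⟨x.2, (PySem.List.mem_sorted _ _ _ _).mpr ((PySem.Set.mem_ofList _ _).mpr h2), by
      rw [← h1]⟩

theorem pv_block_pairwise (ast : List Char) (P : List (List Char × Bool)) (n : List Char) :
    (pvBlock ast P n).Pairwise
      (fun a b => (toLex (a.1, a.2) : Lex (List Char × List Char)) < toLex (b.1, b.2)) := by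
  unfold pvBlock
  have hI : (fun (a b : List Char) => a.decidableLT b) = (LinearOrder.toDecidableLT : DecidableLT (List Char)) :=
    Subsingleton.elim _ _
  rw [hI]
  refine List.Pairwise.map _ ?_ (PySem.List.sorted_ofList_pairwise_lt _)
  intro s1 s2 h
  rw [Prod.Lex.lt_iff]
  simp only [ofLex_toLex]
  exact Or.inr ⟨trivial, h⟩

theorem pv_block_ne_nil (ast : List Char) (P : List (List Char × Bool)) (n : List Char)
    (h : pvSufL ast P n ≠ []) : pvBlock ast P n ≠ [] := by
  unfold pvBlock
  intro hc
  rcases List.map_eq_nil_iff.mp hc with hc2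
  rw [PySem.List.sorted_eq_nil_iff] at hc2
  cases hs : pvSufL ast P n with
  | nil => exact h hs
  | cons a t =>
    have : a ∈ PySem.Set.ofList (pvSufL ast P n) := (PySem.Set.mem_ofList _ _).mpr (by rw [hs]; simp)
    rw [hc2] at this
    exact List.not_mem_nil this

-- pairwise over the flatMap of blocks

theorem pv_pairwise_blocks (ast : List Char) (P : List (List Char × Bool)) (ms : List (List Char))
    (hms : ms.Pairwise (· < ·)) :
    (ms.flatMap (pvBlock ast P)).Pairwise
      (fun a b => (toLex (a.1, a.2) : Lex (List Char × List Char)) < toLex (b.1, b.2)) := by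
  induction ms with
  | nil => simp
  | cons m ms ih =>
    rw [List.flatMap_cons]
    rcases List.pairwise_cons.mp hms with ⟨hm, hms'⟩
    apply List.pairwise_append.mpr
    refine ⟨?_, ih hms', ?_⟩
    · exact pv_block_pairwise ast P m
    · intro a ha b hb
      obtain ⟨m', hm', hbm'⟩ := List.mem_flatMap.mp hb
      have h1 : a.1 = m := pv_block_fst ast P m a ha
      have h2 : b.1 = m' := pv_block_fst ast P m' b hbm'
      rw [Prod.Lex.lt_iff]
      left
      simpa [h1, h2] using hm m' hm'

theorem pv_gb_blocks (ast : List Char) (P : List (List Char × Bool)) (ms : List (List Char))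
    (hms : ms.Pairwise (· < ·)) (hnb : ∀ n ∈ ms, pvBlock ast P n ≠ []) :
    pvGroupBy (fun p => p.1) (ms.flatMap (pvBlock ast P)) = ms.map (fun n => (n, pvBlock ast P n)) := by
  induction ms with
  | nil => rfl
  | cons m ms ih =>
    rw [List.flatMap_cons,
      pv_gb_run_append (fun p => p.1) m _ _ (hnb m (by simp))
        (fun x hx => pv_block_fst ast P m x hx) ?_,
      ih (List.pairwise_cons.mp hms).2 (fun n hn => hnb n (by simp [hn])), List.map_cons]
    intro y hy
    have hym : y ∈ List.flatMap (pvBlock ast P) ms := by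
      cases hfm : List.flatMap (pvBlock ast P) ms with
      | nil => rw [hfm] at hy; exact absurd hy (by simp)
      | cons a t =>
        rw [hfm] at hy
        simp only [List.head?_cons, Option.some.injEq] at hy
        rw [← hy]
        simp
    obtain ⟨m', hm', hbm'⟩ := List.mem_flatMap.mp hym
    show y.1 ≠ m
    rw [pv_block_fst ast P m' y hbm']
    intro hc
    exact absurd ((List.pairwise_cons.mp hms).1 m' hm') (by rw [hc]; exact lt_irrefl m)

-- membership of the flatMap

theorem pv_mem_flat_iff (ast : List Char) (P : List (List Char × Bool)) (ns : List (List Char))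
    (sels : List Bool) (hP : P = pvZipSel ns sels) (h : sels.length ≤ ns.length)
    (x : List Char × List Char) :
    x ∈ (PySem.List.sorted (PySem.Set.ofList ns) (fun s => s)).flatMap (pvBlock ast P)
      ↔ x ∈ P.map (fun p => (p.1, if p.2 then ast else ([] : List Char))) := by
  rw [List.mem_flatMap]
  constructor
  · rintro ⟨n, hn, hx⟩
    rcases (pv_mem_block_iff ast P n x).mp hx with ⟨h1, h2⟩
    unfold pvSufL at h2
    obtain ⟨p, hp, hps⟩ := List.mem_map.mp h2
    have hp1 : p.1 = n := by simpa using (List.mem_filter.mp hp).2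
    refine List.mem_map.mpr ⟨p, (List.mem_filter.mp hp).1, ?_⟩
    cases x with
    | mk x1 x2 => simp only at h1 h2 hps; rw [← hps, hp1, h1]
  · intro hx
    obtain ⟨p, hp, hps⟩ := List.mem_map.mp hx
    refine ⟨p.1, ?_, ?_⟩
    · rw [PySem.List.mem_sorted, PySem.Set.mem_ofList, ← pv_map_fst_zipSel ns sels h, ← hP]
      exact List.mem_map.mpr ⟨p, hp, rfl⟩
    · rw [pv_mem_block_iff]
      constructor
      · rw [← hps]
      · unfold pvSufL
        refine List.mem_map.mpr ⟨p, List.mem_filter.mpr ⟨hp, by simp⟩, ?_⟩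
        rw [← hps]

theorem pv_sufL_ne_nil (ast : List Char) (ns : List (List Char)) (sels : List Bool)
    (h : sels.length ≤ ns.length) (n : List Char) (hn : n ∈ ns) :
    pvSufL ast (pvZipSel ns sels) n ≠ [] := by
  rw [← pv_map_fst_zipSel ns sels h] at hn
  obtain ⟨p, hp, hp1⟩ := List.mem_map.mp hn
  unfold pvSufL
  intro hc
  rcases List.map_eq_nil_iff.mp hc with hc2
  have : p ∈ (pvZipSel ns sels).filter (fun p => p.1 == n) :=
    List.mem_filter.mpr ⟨hp, by simp [hp1]⟩
  rw [hc2] at this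
  exact List.not_mem_nil this

theorem pv_suf_any (ast : List Char) (P : List (List Char × Bool)) (n : List Char)
    (hast : ast ≠ []) :
    (pvSufL ast P n).any (fun s => s == ast) = P.any (fun p => p.1 == n && p.2) := by
  unfold pvSufL
  rw [List.any_map]
  induction P with
  | nil => rfl
  | cons p P ih =>
    rw [List.filter_cons]
    by_cases hp : (p.1 == n) = true
    · simp only [hp, if_true, List.any_cons, ih, Function.comp]
      congr 1
      cases hs : p.2 with
      | true => simp
      | false => simp [hast]
    · simp only [Bool.not_eq_true] at hp
      simp [hp, ih]

theorem pv_block_last (ast : List Char) (ns : List (List Char)) (sels : List Bool)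
    (h : sels.length ≤ ns.length) (n : List Char) (hn : n ∈ ns) :
    PySem.List.pyGetD (pvBlock ast (pvZipSel ns sels) n) (-1) ([], [])
      = (n, pvSfx ast (pvZipSel ns sels) n) := by
  have hsne := pv_sufL_ne_nil ast ns sels h n hn
  have hbne := pv_block_ne_nil ast (pvZipSel ns sels) n hsne
  rw [PySem.List.pyGetD_neg_one _ _ hbne]
  have hlast := pv_last_sufset ast (pvSufL ast (pvZipSel ns sels) n) hsne (by
    intro s hs
    unfold pvSufL at hs
    obtain ⟨p, _, hps⟩ := List.mem_map.mp hs
    cases hp2 : p.2 with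
    | true => right; rw [← hps, hp2]; simp
    | false => left; rw [← hps, hp2]; simp)
  have hmap : (pvBlock ast (pvZipSel ns sels) n).getLast? =
      some (n, if (pvSufL ast (pvZipSel ns sels) n).any (fun s => s == ast) then ast else []) := by
    unfold pvBlock
    rw [List.getLast?_map, hlast]
    rfl
  have hval := Option.some.inj ((List.getLast?_eq_some_getLast hbne).symm.trans hmap)
  rw [hval]
  by_cases hast : ast = []
  · subst hast
    simp [pvSfx]
  · rw [pv_suf_any ast (pvZipSel ns sels) n hast]
    rfl

theorem pv_A_lasts (ns : List (List Char)) (sels : List Bool) (ast : List Char)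
    (h : sels.length ≤ ns.length) :
    (pvGroupBy (fun p => p.1)
        (PySem.List.sorted2
          (PySem.Set.ofList ((pvZipSel ns sels).map (fun p => (p.1, if p.2 then ast else ([] : List Char)))))
          (fun p => p.1) (fun p => p.2))).map (fun g => PySem.List.pyGetD g.2 (-1) ([], []))
      = (PySem.List.sorted (PySem.Set.ofList ns) (fun s => s)).map
          (fun n => (n, pvSfx ast (pvZipSel ns sels) n)) := by
  have hI : (fun (a b : List Char) => a.decidableLT b) = (LinearOrder.toDecidableLT : DecidableLT (List Char)) :=
    Subsingleton.elim _ _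
  have hSNpw : (PySem.List.sorted (PySem.Set.ofList ns) (fun s => s)).Pairwise (· < ·) := by
    rw [hI]
    exact PySem.List.sorted_ofList_pairwise_lt ns
  have hSNmem : ∀ n ∈ PySem.List.sorted (PySem.Set.ofList ns) (fun s => s), n ∈ ns := by
    intro n hn
    exact (PySem.Set.mem_ofList _ _).mp ((PySem.List.mem_sorted _ _ _ _).mp hn)
  have hstage1 : PySem.List.sorted2
      (PySem.Set.ofList ((pvZipSel ns sels).map (fun p => (p.1, if p.2 then ast else ([] : List Char)))))
      (fun p => p.1) (fun p => p.2)
      = (PySem.List.sorted (PySem.Set.ofList ns) (fun s => s)).flatMap (pvBlock ast (pvZipSel ns sels)) := by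
    rw [pv_sorted2_eq_sorted_lex _ _ LinearOrder.toDecidableLT]
    have hpw := pv_pairwise_blocks ast (pvZipSel ns sels)
      (PySem.List.sorted (PySem.Set.ofList ns) (fun s => s)) hSNpw
    apply PySem.List.sorted_eq_of_perm_of_pairwise_lt _ _
      (fun p : List Char × List Char => (toLex (p.1, p.2) : Lex (List Char × List Char))) ?_ hpw
    refine (List.perm_ext_iff_of_nodup ?_ (PySem.Set.nodup_ofList _)).mpr ?_
    · refine List.Pairwise.imp ?_ hpw
      intro a b hab hc
      rw [hc] at hab
      exact lt_irrefl _ hab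
    · intro x
      rw [PySem.Set.mem_ofList]
      exact pv_mem_flat_iff ast (pvZipSel ns sels) ns sels rfl h x
  rw [hstage1, pv_gb_blocks ast (pvZipSel ns sels) _ hSNpw
    (fun n hn => pv_block_ne_nil _ _ _ (pv_sufL_ne_nil ast ns sels h n (hSNmem n hn))),
    List.map_map]
  apply List.map_congr_left
  intro n hn
  exact pv_block_last ast ns sels h n (hSNmem n hn)

theorem pv_gb_const {α κ : Type} [BEq κ] [LawfulBEq κ] (key : α → κ) (k : κ)
    (xs : List α) (hne : xs ≠ []) (hk : ∀ x ∈ xs, key x = k) :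
    pvGroupBy key xs = [(k, xs)] := by
  have := pv_gb_run_append key k xs [] hne hk (by intro y hy; simp at hy)
  simpa using this

-- B's partition fold, generalized over the element type and display function

theorem pv_B_partition {α : Type} (xs : List α) (dv : α → List Char)
    (p0 : List (List Char)) (r0 : List (List (List Char))) :
    xs.foldl
      (fun (acc : List (List Char) × List (List (List Char))) t =>
        if (PySem.Chars.split₀ (dv t)).length == 2 then (acc.1, acc.2 ++ [PySem.Chars.split₀ (dv t)])
        else (acc.1 ++ [dv t], acc.2))
      (p0, r0)
      = (p0 ++ (xs.map dv).filter (fun d => !pvIsSpecies d),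
         r0 ++ ((xs.map dv).filter pvIsSpecies).map PySem.Chars.split₀) := by
  induction xs generalizing p0 r0 with
  | nil => simp
  | cons x xs ih =>
    simp only [List.foldl_cons, List.map_cons, List.filter_cons]
    by_cases hd : ((PySem.Chars.split₀ (dv x)).length == 2) = true
    · simp only [hd, if_true, ih]
      simp [pvIsSpecies, hd]
    · simp only [Bool.not_eq_true] at hd
      simp only [hd, Bool.false_eq_true, if_false, ih]
      simp [pvIsSpecies, hd]

theorem pv_tax (FF : List (List Char) → List (List Char)) (hFF : FF [] = [])
    (NS SP : List (List Char)) (hNS : ∀ d ∈ NS, pvIsSpecies d = false)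
    (hSP : ∀ d ∈ SP, pvIsSpecies d = true) :
    (pvGroupBy pvIsSpecies (NS ++ SP)).foldl
      (fun tax g => tax ++ (if g.1 then FF g.2 else g.2)) []
      = NS ++ FF SP := by
  cases hNSe : NS with
  | nil =>
    cases hSPe : SP with
    | nil =>
      simp only [List.nil_append]
      rw [hFF]
      rfl
    | cons a t =>
      rw [List.nil_append]
      rw [pv_gb_const pvIsSpecies true (a :: t) (by simp) (by rw [← hSPe]; exact hSP)]
      simp
  | cons a t =>
    cases hSPe : SP with
    | nil =>
      rw [List.append_nil]
      rw [pv_gb_const pvIsSpecies false (a :: t) (by simp) (by rw [← hNSe]; exact hNS)]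
      simp [hFF]
    | cons b u =>
      rw [pv_gb_run_append pvIsSpecies false (a :: t) (b :: u) (by simp)
        (by rw [← hNSe]; exact hNS)
        (by intro y hy; simp only [List.head?_cons, Option.some.injEq] at hy
            rw [← hy, hSP b (by rw [hSPe]; simp)]; simp)]
      rw [pv_gb_const pvIsSpecies true (b :: u) (by simp) (by rw [← hSPe]; exact hSP)]
      simp

theorem pv_main (ns : List (List Char)) (sels : List Bool) (ast : List Char)
    (h : sels.length ≤ ns.length) : pvFmtA ns sels ast = pvFmtB ns sels ast := by
  have hofl : ns.foldl (fun u n => if u.contains n then u else u ++ [n]) [] = PySem.Set.ofList ns := rfl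
  have hA : pvFmtA ns sels ast = PySem.Chars.join [';'] (PySem.List.sorted
      ((pvGroupBy pvIsSpecies (PySem.List.sorted
          (((pvGroupBy (fun p => p.1)
              (PySem.List.sorted2
                (PySem.Set.ofList ((pvZipSel ns sels).map (fun p => (p.1, if p.2 then ast else ([] : List Char)))))
                (fun p => p.1) (fun p => p.2))).map
            (fun g => PySem.List.pyGetD g.2 (-1) ([], []))).map (fun p => p.1 ++ p.2))
          pvIsSpecies)).foldl
        (fun tax g => tax ++ (if g.1 then
            (pvGroupBy (fun ws => PySem.List.pyGetD ws 0 []) (g.2.map PySem.Chars.split₀)).map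
              (fun kg => kg.1 ++ ' ' :: PySem.Chars.join ['/']
                (kg.2.map (fun ws => PySem.List.pyGetD ws 1 [])))
          else g.2)) []) (fun s => s)) := rfl
  rw [hA, pv_A_lasts ns sels ast h, List.map_map, pv_sorted_bool_filter]
  set DS := List.map ((fun p : List Char × List Char => p.1 ++ p.2) ∘
      fun n => (n, pvSfx ast (pvZipSel ns sels) n))
    (PySem.List.sorted (PySem.Set.ofList ns) fun s => s) with hDS
  rw [pv_tax (fun l => (pvGroupBy (fun ws => PySem.List.pyGetD ws 0 []) (l.map PySem.Chars.split₀)).map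
      (fun kg => kg.1 ++ ' ' :: PySem.Chars.join ['/'] (kg.2.map (fun ws => PySem.List.pyGetD ws 1 []))))
    rfl (DS.filter (fun x => !pvIsSpecies x)) (DS.filter (fun x => pvIsSpecies x))
    (fun d hd => by simpa using (List.mem_filter.mp hd).2)
    (fun d hd => by simpa using (List.mem_filter.mp hd).2)]
  -- B side
  have hacc : (PySem.List.sorted
        ((ns.foldl (fun u n => if u.contains n then u else u ++ [n]) []).map
          (fun n => (n, (ns.zip (sels ++ List.replicate (ns.length - sels.length) false)).any
            (fun p => p.1 == n && p.2))))
        (fun t => t.1)).foldl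
      (fun (acc : List (List Char) × List (List (List Char))) t =>
        if (PySem.Chars.split₀ (t.1 ++ (if t.2 then ast else []))).length == 2
        then (acc.1, acc.2 ++ [PySem.Chars.split₀ (t.1 ++ (if t.2 then ast else []))])
        else (acc.1 ++ [t.1 ++ (if t.2 then ast else [])], acc.2))
      ([], [])
      = ((((PySem.List.sorted (PySem.Set.ofList ns) (fun s => s)).map
            (fun n => n ++ (if (pvZipSel ns sels).any (fun p => p.1 == n && p.2) then ast else []))).filter
          (fun d => !pvIsSpecies d)),
         ((((PySem.List.sorted (PySem.Set.ofList ns) (fun s => s)).map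
            (fun n => n ++ (if (pvZipSel ns sels).any (fun p => p.1 == n && p.2) then ast else []))).filter
          pvIsSpecies).map PySem.Chars.split₀)) := by
    rw [pv_zip_pad ns sels h, hofl,
      pv_B_sorted ns (fun n => ((pvZipSel ns sels).any (fun p => p.1 == n && p.2))),
      List.foldl_map]
    have := pv_B_partition (PySem.List.sorted (PySem.Set.ofList ns) (fun s => s))
      (fun n => n ++ (if (pvZipSel ns sels).any (fun p => p.1 == n && p.2) then ast else [])) [] []
    simpa using this
  have hB := congrArg (fun (acc : List (List Char) × List (List (List Char))) =>
      PySem.Chars.join [';'] (PySem.List.sorted (acc.1 ++ pvRuns acc.2) (fun s => s))) hacc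
  simp only at hB
  rw [← pv_runs_eq]
  exact hB.symm

-- ===== VERDICT (by name: the statement is the Claim_ definition above) =====
theorem format_lineages_spec : Claim_equal_format_lineages := by
  intro names selectors asterisk _ hpre
  unfold Spec_format_lineages format_lineages format_lineages_alt
  rw [pv_main]
  simpa [Pre_format_lineages] using hpre

theorem format_lineages_raises : Claim_raises_format_lineages := by
  unfold Claim_raises_format_lineages
  refine ⟨?_, by decide, by decide, ?_⟩
  · intro ns ss a _ hr hp
    unfold Pre_format_lineages at hp
    unfold Raises_format_lineages at hr
    omega
  · show String.ofList (pvFmtB _ _ _) = _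
    rw [show pvFmtB (pvRaiseWitness_format_lineages.1.map (·.toList))
        pvRaiseWitness_format_lineages.2.1 pvRaiseWitness_format_lineages.2.2.toList
      = ("Canis lupus*").toList from by decide]
    exact String.ofList_toList

-- self-check: both delivered claims, packaged (keeps each verdict referenced)
theorem format_lineages_ok : Claim_equal_format_lineages ∧ Claim_raises_format_lineages :=
  ⟨format_lineages_spec, format_lineages_raises⟩
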